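-- pv_equiv track=rewrite | github.com/stral0/psiml2021 | cetvrti.py | group_ones
-- ===== SOURCE A (Python) =====
-- def following_ones(row):
--     new = []
--     for i in range(len(row) - 1):
--         if row[i] != 1:
--             new.append(0)
--             continue
--         if i > 0:
--             if row[i - 1] == 1:
--                 new.append(-1)
--                 continue
--         counter = 0
--         for j in range(i + 1, len(row)):
--             if row[j] == 1:
--                 counter += 1
--             else:
--                 break
--         new.append(counter)
--     if row[-1] == 1 and row[-2] in [1, 2, 3, 4, 5, 6, 7, 8]:
--         new.append(-1)
--     else:
--         new.append(0)
--     return new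
--
-- def group_ones(row):
--     fo = following_ones(row)
--     for i in range(len(fo)):
--         if row[i] == 1:
--             row[i] += fo[i]
--     while 0 in row:
--         row.pop(row.index(0))
--
--     return row
-- ===== SOURCE B (Python) =====
-- def group_ones(row):
--     # Single pass over maximal runs of ones: emit each run's length, keep other
--     # non-zero values, skip zeros.
--     # (A mutates `row` in place; B leaves its argument untouched.)
--     n = len(row)
--     out = []
--     i = 0
--     while i < n:
--         if row[i] == 1:
--             j = i
--             while j < n and row[j] == 1:
--                 j += 1
--             out.append(j - i)
--             i = j
--         else:
--             if row[i] != 0: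
--                 out.append(row[i])
--             i += 1
--     return out
-- ===== Notes on version B (the rewrite author's own statement) =====
-- stated objective: alternative
-- what changed: B replaces A's helper array of per-index forward scans plus in-place increment and repeated pop(index(0)) with one direct pass over maximal runs of ones; Pre_ excludes only the empty list and [1], on which A raises IndexError.
-- intended difference: On rows ending in a lone 1 whose preceding element is in 2..8, A's 'row[-2] in [1,...,8]' test fires for non-1 values and silently drops the trailing 1 from the result, while B reports that run of ones of length 1, which is the intended value. — e.g. on group_ones([2, 1]): A returns [2], B returns [2, 1]
-- outside the precondition, e.g. on group_ones([]): A raises IndexError, B returns []; on group_ones([1]): A raises IndexError, B returns [1]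
import Mathlib
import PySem

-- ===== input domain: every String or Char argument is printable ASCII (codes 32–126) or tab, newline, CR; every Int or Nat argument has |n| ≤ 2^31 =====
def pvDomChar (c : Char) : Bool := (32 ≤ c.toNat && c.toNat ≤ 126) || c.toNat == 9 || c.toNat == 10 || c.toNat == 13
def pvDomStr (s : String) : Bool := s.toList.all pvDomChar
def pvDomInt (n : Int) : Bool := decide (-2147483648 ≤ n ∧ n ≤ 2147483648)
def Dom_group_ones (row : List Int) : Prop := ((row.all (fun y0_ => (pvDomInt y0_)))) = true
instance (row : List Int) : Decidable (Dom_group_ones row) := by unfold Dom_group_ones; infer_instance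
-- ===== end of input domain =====

-- B replaces A's per-index forward scans, in-place increments and repeated pop(index(0)) with one
-- direct pass over maximal runs of ones (a different algorithm of similar cost).
-- NOTE: Python A mutates `row` in place (increments entries, pops zeros) and B does not; the
-- equivalence proved here is about the RETURN value only.

-- ===== PORT A =====
-- inner loop 'for j in range(i+1, len(row)): if row[j]==1: counter+=1 else: break',
-- applied to the suffix row[i+1:]: counts the prefix of ones
def pvCountOnes : List Int → Int
  | [] => 0
  | x :: xs => if x = 1 then 1 + pvCountOnes xs else 0

def following_ones (row : List Int) : List Int :=
  let n := row.length
  let new := (List.range (n - 1)).foldl (fun acc (i : Nat) =>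
    if PySem.List.pyGetD row (i : Int) 0 ≠ 1 then acc ++ [0]
    else if 0 < i ∧ PySem.List.pyGetD row ((i : Int) - 1) 0 = 1 then acc ++ [(-1 : Int)]
    else acc ++ [pvCountOnes (row.drop (i + 1))]) []
  -- 'row[-1] == 1 and row[-2] in [...]': Python short-circuits; it raises IndexError only on
  -- [] (row[-1]) and on [1] (row[-2]) — exactly the inputs Pre_ excludes
  if PySem.List.pyGetD row (-1) 0 = 1 ∧ PySem.List.pyGetD row (-2) 0 ∈ ([1,2,3,4,5,6,7,8] : List Int)
  then new ++ [(-1 : Int)] else new ++ [0]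

-- 'while 0 in row: row.pop(row.index(0))' — repeatedly erase the first 0
def pvRemoveZeros (r : List Int) : List Int :=
  if h : (0 : Int) ∈ r then pvRemoveZeros (r.erase 0) else r
termination_by r.length
decreasing_by exact List.length_erase_of_mem h ▸ Nat.sub_lt (List.length_pos_of_mem h) Nat.one_pos

def group_ones (row : List Int) : List Int :=
  let fo := following_ones row
  let row1 := (List.range fo.length).foldl (fun r (i : Nat) =>
    if PySem.List.pyGetD r (i : Int) 0 = 1 then
      r.set i (PySem.List.pyGetD r (i : Int) 0 + PySem.List.pyGetD fo (i : Int) 0)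
    else r) row
  pvRemoveZeros row1

-- ===== PORT B =====
-- 'while j < n and row[j] == 1: j += 1'
def pvRunEnd (row : List Int) (n j : Nat) : Nat :=
  if h : j < n ∧ PySem.List.pyGetD row (j : Int) 0 = 1 then pvRunEnd row n (j + 1) else j
termination_by n - j
decreasing_by omega

-- cited by pvAltLoop's termination proof
theorem pvRunEnd_ge (row : List Int) (n j : Nat) : j ≤ pvRunEnd row n j := by
  unfold pvRunEnd
  split_ifs with h
  · have := pvRunEnd_ge row n (j + 1); omega
  · exact Nat.le_refl j
termination_by n - j
decreasing_by omega

-- the outer 'while i < n' loop of B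
def pvAltLoop (row : List Int) (n i : Nat) : List Int :=
  if h : i < n then
    if hv : PySem.List.pyGetD row (i : Int) 0 = 1 then
      ((pvRunEnd row n i : Int) - (i : Int)) :: pvAltLoop row n (pvRunEnd row n i)
    else
      if PySem.List.pyGetD row (i : Int) 0 ≠ 0 then
        PySem.List.pyGetD row (i : Int) 0 :: pvAltLoop row n (i + 1)
      else pvAltLoop row n (i + 1)
  else []
termination_by n - i
decreasing_by
  · have h1 : pvRunEnd row n i = pvRunEnd row n (i + 1) := by
      rw [pvRunEnd]; rw [dif_pos ⟨h, hv⟩]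
    have h2 := pvRunEnd_ge row n (i + 1)
    omega
  · omega
  · omega

def group_ones_alt (row : List Int) : List Int := pvAltLoop row row.length 0

-- ===== PRECONDITION & SPEC =====
-- Pre_ excludes exactly the inputs on which A raises IndexError: the empty list (row[-1])
-- and the single-element list [1] (row[-1]==1 short-circuit makes it read row[-2]).
def Pre_group_ones (row : List Int) : Prop := row ≠ [] ∧ ¬(row.length = 1 ∧ row.getD 0 0 = 1)
instance (row : List Int) : Decidable (Pre_group_ones row) := by unfold Pre_group_ones; infer_instance

def pvWitness_group_ones : List Int := [1, 0, 2]

-- On rows ending in a lone 1 whose preceding element is in 2..8, A's 'row[-2] in [1,...,8]' test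
-- fires for non-1 values and silently drops the trailing 1, while B reports that run of length 1,
-- which is the intended value.
def D_group_ones (row : List Int) : Prop :=
  row.getLast? = some 1 ∧ 2 ≤ row.dropLast.getLastD 0 ∧ row.dropLast.getLastD 0 ≤ 8
instance (row : List Int) : Decidable (D_group_ones row) := by unfold D_group_ones; infer_instance

def Spec_group_ones (row : List Int) (out : List Int) : Prop := ¬ D_group_ones row → out = group_ones_alt row
instance (row : List Int) (out : List Int) : Decidable (Spec_group_ones row out) := by unfold Spec_group_ones; infer_instance

def pvDiffWitness_group_ones : List Int := [2, 1]
def pvDiffWitnessOut_group_ones : (List Int) × (List Int) := ([2], [2, 1])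

-- ===== CLAIM (what is proved, stated in full; the proofs are below) =====
def Claim_unchanged_group_ones : Prop := ∀ (row : List Int), Dom_group_ones row → Pre_group_ones row → Spec_group_ones row (group_ones row)
def Claim_changed_group_ones : Prop := Dom_group_ones (pvDiffWitness_group_ones) ∧ Pre_group_ones (pvDiffWitness_group_ones) ∧ D_group_ones (pvDiffWitness_group_ones) ∧ group_ones (pvDiffWitness_group_ones) = pvDiffWitnessOut_group_ones.1 ∧ group_ones_alt (pvDiffWitness_group_ones) = pvDiffWitnessOut_group_ones.2 ∧ pvDiffWitnessOut_group_ones.1 ≠ pvDiffWitnessOut_group_ones.2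
def Claim_exact_group_ones : Prop := ∀ (row : List Int), Dom_group_ones row → Pre_group_ones row → D_group_ones row → group_ones row ≠ group_ones_alt row

-- ===== LEMMAS AND PROOFS =====

-- D_ in terms of positional lookups, as the proofs use it
theorem D_char (row : List Int) :
    D_group_ones row ↔ (2 ≤ row.length ∧ row.getD (row.length - 1) 0 = 1 ∧
      2 ≤ row.getD (row.length - 2) 0 ∧ row.getD (row.length - 2) 0 ≤ 8) := by
  unfold D_group_ones
  have hgl : row.getLast? = row[row.length - 1]? := List.getLast?_eq_getElem?
  have hgd : row.dropLast.getLastD 0 = (row.dropLast.getLast?).getD 0 :=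
    List.getLastD_eq_getLast?
  have hdl : row.dropLast.getLast? = row.dropLast[row.dropLast.length - 1]? :=
    List.getLast?_eq_getElem?
  have hlen : row.dropLast.length = row.length - 1 := List.length_dropLast
  by_cases h2 : 2 ≤ row.length
  · have hidx : row.dropLast[row.dropLast.length - 1]? = row[row.length - 2]? := by
      rw [hlen, List.getElem?_dropLast, if_pos (by omega), show row.length - 1 - 1 = row.length - 2 from by omega]
    constructor
    · rintro ⟨hl, hb1, hb2⟩
      refine ⟨h2, ?_, ?_, ?_⟩
      · rw [List.getD_eq_getElem?_getD, ← hgl, hl]; rfl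
      · rwa [List.getD_eq_getElem?_getD, ← hidx, ← hdl, ← hgd]
      · rwa [List.getD_eq_getElem?_getD, ← hidx, ← hdl, ← hgd]
    · rintro ⟨-, hb1, hb2, hb3⟩
      refine ⟨?_, ?_, ?_⟩
      · rw [hgl]
        rw [List.getD_eq_getElem?_getD] at hb1
        cases hx : row[row.length - 1]? with
        | none => rw [hx] at hb1; simp at hb1
        | some v => rw [hx] at hb1; simp only [Option.getD_some] at hb1; rw [hb1]
      · rwa [hgd, hdl, hidx, ← List.getD_eq_getElem?_getD]
      · rwa [hgd, hdl, hidx, ← List.getD_eq_getElem?_getD]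
  · constructor
    · rintro ⟨hl, hb1, hb2⟩
      exfalso
      have hne : row ≠ [] := by rintro rfl; simp at hl
      have h1 : row.length = 1 := by
        have := List.length_pos_of_ne_nil hne
        omega
      have : row.dropLast = [] := List.eq_nil_of_length_eq_zero (by omega)
      rw [this] at hb1
      simp only [List.getLastD_nil] at hb1
      omega
    · rintro ⟨h, -⟩
      exact absurd h h2


-- per-index value of A's result before zero removal, and the same for B
def pvVal (row : List Int) (i : Nat) : Int :=
  if row.getD i 0 ≠ 1 then row.getD i 0
  else if i = row.length - 1 then
    (if row.getD (row.length - 2) 0 ∈ ([1,2,3,4,5,6,7,8] : List Int) then 0 else 1)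
  else if 0 < i ∧ row.getD (i - 1) 0 = 1 then 0
  else 1 + pvCountOnes (row.drop (i + 1))

def pvValB (row : List Int) (i : Nat) : Int :=
  if row.getD i 0 ≠ 1 then row.getD i 0
  else if 0 < i ∧ row.getD (i - 1) 0 = 1 then 0
  else 1 + pvCountOnes (row.drop (i + 1))

def pvSpec (row : List Int) : List Int := ((List.range row.length).map (pvVal row)).filter (· ≠ 0)
def pvSpecB (row : List Int) : List Int := ((List.range row.length).map (pvValB row)).filter (· ≠ 0)

-- per-index value of A's `following_ones` list, positions 0 .. n-2 and the last one
def pvFoVal (row : List Int) (i : Nat) : Int :=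
  if row.getD i 0 ≠ 1 then 0
  else if 0 < i ∧ row.getD (i - 1) 0 = 1 then -1
  else pvCountOnes (row.drop (i + 1))

def pvFoLast (row : List Int) : Int :=
  if row.getD (row.length - 1) 0 = 1 ∧ row.getD (row.length - 2) 0 ∈ ([1,2,3,4,5,6,7,8] : List Int)
  then -1 else 0

theorem pyGetD_neg_one (row : List Int) (h : 1 ≤ row.length) :
    PySem.List.pyGetD row (-1) 0 = row.getD (row.length - 1) 0 := by
  simp only [PySem.List.pyGetD, PySem.List.pyGet?, PySem.List.pyIdx?]
  rw [if_neg (by omega), if_pos (by push_cast; omega)]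
  simp [List.getD_eq_getElem?_getD]

theorem pyGetD_neg_two (row : List Int) (h : 2 ≤ row.length) :
    PySem.List.pyGetD row (-2) 0 = row.getD (row.length - 2) 0 := by
  simp only [PySem.List.pyGetD, PySem.List.pyGet?, PySem.List.pyIdx?]
  rw [if_neg (by omega), if_pos (by push_cast; omega)]
  simp [List.getD_eq_getElem?_getD]

theorem fo_eq (row : List Int) (h : 2 ≤ row.length) :
    following_ones row
      = (List.range (row.length - 1)).map (pvFoVal row) ++ [pvFoLast row] := by
  simp only [following_ones]
  have hcong : ∀ (acc : List Int), ∀ i ∈ List.range (row.length - 1),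
      (if PySem.List.pyGetD row (i : Int) 0 ≠ 1 then acc ++ [0]
       else if 0 < i ∧ PySem.List.pyGetD row ((i : Int) - 1) 0 = 1 then acc ++ [(-1 : Int)]
       else acc ++ [pvCountOnes (row.drop (i + 1))])
      = acc ++ [pvFoVal row i] := by
    intro acc i hi
    have e1 : PySem.List.pyGetD row (i : Int) 0 = row.getD i 0 :=
      PySem.List.pyGetD_natCast row i 0
    unfold pvFoVal
    by_cases h1 : row.getD i 0 ≠ 1
    · rw [if_pos (by rw [e1]; exact h1), if_pos h1]
    · rw [if_neg (by rw [e1]; exact h1), if_neg h1]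
      by_cases h2 : 0 < i
      · have e2 : ((i : Int) - 1) = ((i - 1 : Nat) : Int) := by omega
        rw [e2, PySem.List.pyGetD_natCast]
        split_ifs <;> rfl
      · rw [if_neg (by simp [h2]), if_neg (by simp [h2])]
  rw [PySem.List.foldl_congr_mem _ _ _ _ hcong, PySem.List.foldl_append_singleton_eq_map]
  rw [pyGetD_neg_one row (by omega), pyGetD_neg_two row h]
  unfold pvFoLast
  split_ifs <;> simp

theorem pvSetFold (row fo : List Int) (k : Nat) (hk : k ≤ row.length) :
    (List.range k).foldl (fun r (i : Nat) =>
        if PySem.List.pyGetD r (i : Int) 0 = 1 then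
          r.set i (PySem.List.pyGetD r (i : Int) 0 + PySem.List.pyGetD fo (i : Int) 0)
        else r) row
    = row.mapIdx (fun i a => if i < k ∧ a = 1 then a + fo.getD i 0 else a) := by
  induction k with
  | zero =>
    simp [List.mapIdx_eq_zipIdx_map]
  | succ k ih =>
    rw [List.range_succ, List.foldl_append, ih (by omega), List.foldl_cons, List.foldl_nil]
    have hk' : k < row.length := by omega
    have hlen : (row.mapIdx (fun i a => if i < k ∧ a = 1 then a + fo.getD i 0 else a)).length
        = row.length := by simp
    have hget : PySem.List.pyGetD
        (row.mapIdx (fun i a => if i < k ∧ a = 1 then a + fo.getD i 0 else a)) (k : Int) 0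
        = row[k] := by
      rw [PySem.List.pyGetD_natCast, List.getD_eq_getElem _ _ (by omega), List.getElem_mapIdx]
      simp
    by_cases h1 : row[k] = 1
    · rw [if_pos (by rw [hget]; exact h1)]
      apply List.ext_getElem (by simp)
      intro i hi1 hi2
      simp only [List.getElem_set, List.getElem_mapIdx, hget, PySem.List.pyGetD_natCast fo k 0]
      by_cases hik : k = i
      · subst hik
        rw [if_pos rfl, if_pos ⟨Nat.lt_succ_self k, h1⟩]
      · rw [if_neg hik]
        split_ifs with hc1 hc2 hc2
        · rfl
        · exact absurd ⟨by omega, hc1.2⟩ hc2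
        · exact absurd ⟨by omega, hc2.2⟩ hc1
        · rfl
    · rw [if_neg (by rw [hget]; exact h1)]
      apply List.ext_getElem (by simp)
      intro i hi1 hi2
      simp only [List.getElem_mapIdx]
      split_ifs with hc1 hc2 hc2
      · rfl
      · exact absurd ⟨by omega, hc1.2⟩ hc2
      · rcases Nat.lt_succ_iff_lt_or_eq.mp hc2.1 with hlt | heq
        · exact absurd ⟨hlt, hc2.2⟩ hc1
        · subst heq
          exact absurd hc2.2 h1
      · rfl

theorem row1_eq (row : List Int) (h : 2 ≤ row.length) :
    row.mapIdx (fun i a => if i < row.length ∧ a = 1 then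
        a + ((List.range (row.length - 1)).map (pvFoVal row) ++ [pvFoLast row]).getD i 0 else a)
    = (List.range row.length).map (pvVal row) := by
  apply List.ext_getElem (by simp)
  intro i hi1 hi2
  have hi : i < row.length := by simpa using hi1
  rw [List.getElem_mapIdx, List.getElem_map, List.getElem_range]
  have hrg : row.getD i 0 = row[i] := List.getD_eq_getElem _ _ hi
  have hlen1 : ((List.range (row.length - 1)).map (pvFoVal row)).length = row.length - 1 := by simp
  by_cases h1 : row[i] = 1
  · rw [if_pos ⟨hi, h1⟩]
    by_cases hil : i < row.length - 1
    · have hfod : ((List.range (row.length - 1)).map (pvFoVal row) ++ [pvFoLast row]).getD i 0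
          = pvFoVal row i := by
        rw [List.getD_append _ _ _ _ (by omega), List.getD_eq_getElem _ _ (by simpa using hil)]
        simp
      rw [hfod, pvVal, if_neg (by rw [hrg]; simp [h1]), if_neg (by omega)]
      rw [pvFoVal, if_neg (by rw [hrg]; simp [h1])]
      split_ifs <;> omega
    · have hie : i = row.length - 1 := by omega
      have hfod : ((List.range (row.length - 1)).map (pvFoVal row) ++ [pvFoLast row]).getD i 0
          = pvFoLast row := by
        rw [List.getD_append_right _ _ _ _ (by omega)]
        simp [hlen1, hie]
      rw [hfod, pvVal, if_neg (by rw [hrg]; simp [h1]), if_pos hie]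
      simp only [pvFoLast]
      have hlast1 : row.getD (row.length - 1) 0 = 1 := by rw [← hie, hrg, h1]
      rw [h1, hlast1]
      split_ifs with hc1 hc2 hc2
      · ring
      · exact absurd hc1.2 hc2
      · exact absurd ⟨rfl, hc2⟩ hc1
      · ring
  · rw [if_neg (by intro hc; exact h1 hc.2), pvVal, if_pos (by rw [hrg]; simp [h1]), hrg]

theorem filter_erase_zero (r : List Int) : (r.erase 0).filter (· ≠ 0) = r.filter (· ≠ 0) := by
  induction r with
  | nil => rfl
  | cons a t ih =>
    by_cases ha : a = 0
    · subst ha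
      simp [List.erase_cons]
    · rw [List.erase_cons, if_neg (by simpa using ha)]
      simp only [List.filter_cons]
      rw [ih]

theorem pvRemoveZeros_eq (r : List Int) : pvRemoveZeros r = r.filter (· ≠ 0) := by
  rw [pvRemoveZeros]
  split_ifs with h
  · rw [pvRemoveZeros_eq (r.erase 0), filter_erase_zero]
  · symm
    rw [List.filter_eq_self]
    intro a ha
    simp only [ne_eq, decide_not, Bool.not_eq_eq_eq_not, Bool.not_true, decide_eq_false_iff_not,
      Decidable.not_not]
    intro e
    exact h (e ▸ ha)
termination_by r.length
decreasing_by exact List.length_erase_of_mem h ▸ Nat.sub_lt (List.length_pos_of_mem h) Nat.one_pos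

theorem A_eq_spec (row : List Int) (h : 2 ≤ row.length) : group_ones row = pvSpec row := by
  simp only [group_ones]
  have hlen : (following_ones row).length = row.length := by
    rw [fo_eq row h]
    simp
    omega
  rw [hlen, pvSetFold row (following_ones row) row.length (Nat.le_refl _), fo_eq row h,
    row1_eq row h, pvRemoveZeros_eq, pvSpec]

theorem pvRunEnd_le (row : List Int) (n j : Nat) (h : j ≤ n) : pvRunEnd row n j ≤ n := by
  rw [pvRunEnd]
  split_ifs with hc
  · exact pvRunEnd_le row n (j + 1) hc.1
  · exact h
termination_by n - j
decreasing_by omega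

theorem pvRunEnd_ones (row : List Int) (n j k : Nat) (h1 : j ≤ k) (h2 : k < pvRunEnd row n j) :
    PySem.List.pyGetD row (k : Int) 0 = 1 := by
  rw [pvRunEnd] at h2
  by_cases hc : j < n ∧ PySem.List.pyGetD row (j : Int) 0 = 1
  · rw [dif_pos hc] at h2
    by_cases hjk : j = k
    · exact hjk ▸ hc.2
    · exact pvRunEnd_ones row n (j + 1) k (by omega) h2
  · rw [dif_neg hc] at h2
    omega
termination_by n - j
decreasing_by omega

theorem pvRunEnd_stop (row : List Int) (n j : Nat) (h : pvRunEnd row n j < n) :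
    PySem.List.pyGetD row ((pvRunEnd row n j : Nat) : Int) 0 ≠ 1 := by
  rw [pvRunEnd] at h ⊢
  by_cases hc : j < n ∧ PySem.List.pyGetD row (j : Int) 0 = 1
  · rw [dif_pos hc] at h ⊢
    exact pvRunEnd_stop row n (j + 1) h
  · rw [dif_neg hc] at h ⊢
    intro he
    exact hc ⟨h, he⟩
termination_by n - j
decreasing_by omega

theorem pvCnt_eq (row : List Int) (n j : Nat) (hn : n = row.length) (hj : j ≤ n) :
    pvCountOnes (row.drop j) = ((pvRunEnd row n j : Int) - (j : Int)) := by
  by_cases hjn : j < n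
  · have hjr : j < row.length := by omega
    have hdrop : row.drop j = row[j] :: row.drop (j + 1) := List.drop_eq_getElem_cons hjr
    have hget : PySem.List.pyGetD row (j : Int) 0 = row[j] := by
      rw [PySem.List.pyGetD_natCast, List.getD_eq_getElem _ _ hjr]
    by_cases h1 : row[j] = 1
    · rw [pvRunEnd, dif_pos ⟨hjn, by rw [hget]; exact h1⟩]
      have hrec := pvCnt_eq row n (j + 1) hn (by omega)
      have hge := pvRunEnd_ge row n (j + 1)
      rw [hdrop]
      simp only [pvCountOnes, if_pos h1, hrec]
      omega
    · rw [pvRunEnd, dif_neg (by intro hc; exact h1 (by rw [← hget]; exact hc.2))]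
      rw [hdrop]
      simp only [pvCountOnes, if_neg h1]
      omega
  · have hd : row.drop j = [] := List.drop_eq_nil_of_le (by omega)
    rw [pvRunEnd, dif_neg (by intro hc; omega)]
    rw [hd]
    simp [pvCountOnes]
termination_by n - j
decreasing_by omega

theorem pvAltLoop_eq (row : List Int) (n i : Nat) (hn : n = row.length)
    (hinv : n ≤ i ∨ i = 0 ∨ row.getD (i - 1) 0 ≠ 1 ∨ row.getD i 0 ≠ 1) :
    pvAltLoop row n i = ((List.range' i (n - i)).map (pvValB row)).filter (· ≠ 0) := by
  rw [pvAltLoop]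
  by_cases hi : i < n
  case neg =>
    rw [dif_neg hi]
    have h0 : n - i = 0 := by omega
    simp [h0]
  rw [dif_pos hi]
  have hgi : PySem.List.pyGetD row (i : Int) 0 = row.getD i 0 := PySem.List.pyGetD_natCast row i 0
  have hcons : List.range' i (n - i) = i :: List.range' (i + 1) (n - (i + 1)) := by
    rw [show n - i = (n - (i + 1)) + 1 from by omega, List.range'_succ]
  by_cases hv : row.getD i 0 = 1
  case neg =>
    rw [dif_neg (by rw [hgi]; exact hv)]
    have hrec := pvAltLoop_eq row n (i + 1) hn (by right; right; left; simpa using hv)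
    rw [hcons]
    simp only [List.map_cons, List.filter_cons]
    have hval : pvValB row i = row.getD i 0 := by rw [pvValB, if_pos hv]
    by_cases hz : row.getD i 0 = 0
    · rw [if_neg (by rw [hgi]; exact not_not_intro hz), hrec, hval,
        if_neg (by simp only [ne_eq, decide_eq_true_iff]; exact not_not_intro hz)]
    · rw [if_pos (by rw [hgi]; exact hz), hrec, hval, if_pos (decide_eq_true hz), hgi]
  rw [dif_pos (by rw [hgi]; exact hv)]
  have hjgt : i < pvRunEnd row n i := by
    have he : pvRunEnd row n i = pvRunEnd row n (i + 1) := by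
      rw [pvRunEnd, dif_pos ⟨hi, by rw [hgi]; exact hv⟩]
    have := pvRunEnd_ge row n (i + 1)
    omega
  have hjle : pvRunEnd row n i ≤ n := pvRunEnd_le row n i (by omega)
  set j := pvRunEnd row n i with hj
  have hones : ∀ k, i ≤ k → k < j → row.getD k 0 = 1 := by
    intro k a b
    have := pvRunEnd_ones row n i k a b
    rwa [PySem.List.pyGetD_natCast] at this
  have hstop : j < n → row.getD j 0 ≠ 1 := by
    intro hlt
    have := pvRunEnd_stop row n i hlt
    rwa [PySem.List.pyGetD_natCast] at this
  have hsplit : List.range' i (n - i) = List.range' i (j - i) ++ List.range' j (n - j) := by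
    have h1 : i + 1 * (j - i) = j := by omega
    rw [show n - i = (j - i) + (n - j) from by omega, ← List.range'_append, h1]
  rw [hsplit, List.map_append, List.filter_append]
  have hrest := pvAltLoop_eq row n j hn (by
    by_cases hjn : j < n
    · right; right; right; exact hstop hjn
    · left; omega)
  have hhead : List.range' i (j - i) = i :: List.range' (i + 1) (j - (i + 1)) := by
    rw [show j - i = (j - (i + 1)) + 1 from by omega, List.range'_succ]
  have hmid : ((List.range' (i + 1) (j - (i + 1))).map (pvValB row)).filter (· ≠ 0) = [] := by
    rw [List.filter_eq_nil_iff]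
    intro a ha
    simp only [List.mem_map] at ha
    obtain ⟨k, hk, rfl⟩ := ha
    rw [List.mem_range'_1] at hk
    simp only [ne_eq, decide_not, Bool.not_eq_eq_eq_not, Bool.not_true, decide_eq_false_iff_not,
      Decidable.not_not]
    rw [pvValB, if_neg (not_not_intro (hones k (by omega) (by omega))),
      if_pos ⟨by omega, hones (k - 1) (by omega) (by omega)⟩]
  have hvali : pvValB row i = (j : Int) - (i : Int) := by
    rw [pvValB, if_neg (not_not_intro hv)]
    rw [if_neg (by
      rcases hinv with h | h | h | h
      · omega
      · intro hc; omega
      · intro hc; exact h hc.2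
      · exact absurd hv h)]
    have hre : pvRunEnd row n (i + 1) = j := by
      rw [hj]
      conv_rhs => rw [pvRunEnd]
      rw [dif_pos ⟨hi, by rw [hgi]; exact hv⟩]
    have hc := pvCnt_eq row n (i + 1) hn (by omega)
    rw [hre] at hc
    rw [hc]
    omega
  rw [hhead]
  simp only [List.map_cons, List.filter_cons]
  rw [hvali, hmid, if_pos (by simp only [ne_eq, decide_not, Bool.not_eq_eq_eq_not,
    Bool.not_true, decide_eq_false_iff_not, Decidable.not_not]; omega), hrest]
  simp
termination_by n - i
decreasing_by
  · omega
  · omega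

theorem B_eq_spec (row : List Int) : group_ones_alt row = pvSpecB row := by
  rw [group_ones_alt, pvAltLoop_eq row row.length 0 rfl (Or.inr (Or.inl rfl)), pvSpecB]
  rw [Nat.sub_zero, ← List.range_eq_range']

-- A and B assign the same per-index value at every position before the last
theorem vals_agree (row : List Int) (i : Nat) (hi : i < row.length - 1) :
    pvVal row i = pvValB row i := by
  rw [pvVal, pvValB]
  by_cases hA : row.getD i 0 ≠ 1
  · rw [if_pos hA, if_pos hA]
  · rw [if_neg hA, if_neg hA, if_neg (by omega)]

-- ... and, outside D_, at the last position too
theorem last_agree (row : List Int) (h2 : 2 ≤ row.length) (hnd : ¬ D_group_ones row) :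
    pvVal row (row.length - 1) = pvValB row (row.length - 1) := by
  rw [pvVal, pvValB]
  by_cases hA : row.getD (row.length - 1) 0 ≠ 1
  · rw [if_pos hA, if_pos hA]
  · rw [if_neg hA, if_neg hA, if_pos rfl]
    push_neg at hA
    have hprev : ¬(2 ≤ row.getD (row.length - 2) 0 ∧ row.getD (row.length - 2) 0 ≤ 8) := by
      intro hb
      exact hnd ((D_char row).mpr ⟨h2, hA, hb.1, hb.2⟩)
    have hdrop : row.drop (row.length - 1 + 1) = [] := List.drop_eq_nil_of_le (by omega)
    have he : row.length - 1 - 1 = row.length - 2 := by omega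
    by_cases hp : row.getD (row.length - 2) 0 = 1
    · rw [if_pos (by rw [hp]; decide), if_pos ⟨by omega, he ▸ hp⟩]
    · rw [if_neg (by
        intro hm
        simp only [List.mem_cons, List.not_mem_nil, or_false] at hm
        rcases hm with h | h | h | h | h | h | h | h
        · exact hp h
        all_goals exact hprev ⟨by omega, by omega⟩)]
      rw [if_neg (by intro hc; exact hp (he ▸ hc.2)), hdrop]
      simp [pvCountOnes]

theorem singleton_case (x : Int) (hx : x ≠ 1) : group_ones [x] = group_ones_alt [x] := by
  by_cases h0 : x = 0 <;>
    simp [group_ones, group_ones_alt, following_ones, pvAltLoop, pvRemoveZeros_eq,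
      PySem.List.pyGetD, PySem.List.pyGet?, PySem.List.pyIdx?, hx, h0, List.filter]

-- ===== VERDICT (by name: the statement is the Claim_ definition above) =====
theorem group_ones_spec : Claim_unchanged_group_ones := by
  intro row _ hpre hnd
  by_cases h2 : 2 ≤ row.length
  · rw [A_eq_spec row h2, B_eq_spec, pvSpec, pvSpecB]
    congr 1
    apply List.map_congr_left
    intro i hi
    rw [List.mem_range] at hi
    by_cases hil : i < row.length - 1
    · exact vals_agree row i hil
    · rw [show i = row.length - 1 from by omega]
      exact last_agree row h2 hnd
  · obtain ⟨hne, hno⟩ := hpre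
    have h1 : row.length = 1 := by
      cases row with
      | nil => exact absurd rfl hne
      | cons a t => simp only [List.length_cons] at h2 ⊢; omega
    obtain ⟨x, rfl⟩ : ∃ x, row = [x] := by
      cases row with
      | nil => simp at h1
      | cons a t =>
        cases t with
        | nil => exact ⟨a, rfl⟩
        | cons b u => simp at h1
    exact singleton_case x (by intro he; exact hno ⟨h1, by simp [he]⟩)

theorem group_ones_changed : Claim_changed_group_ones := by
  unfold Claim_changed_group_ones
  refine ⟨by decide, by decide, by decide, ?_, ?_, by decide⟩
  · rw [show pvDiffWitness_group_ones = [2, 1] from rfl, A_eq_spec [2, 1] (by decide)]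
    decide
  · rw [show pvDiffWitness_group_ones = [2, 1] from rfl, B_eq_spec]
    decide

theorem group_ones_tight : Claim_exact_group_ones := by
  intro row _ hpre hD
  obtain ⟨h2, hlast, hpl, hpu⟩ := (D_char row).mp hD
  rw [A_eq_spec row h2, B_eq_spec]
  have hsplit : List.range row.length = List.range (row.length - 1) ++ [row.length - 1] := by
    conv_lhs => rw [show row.length = (row.length - 1) + 1 from by omega]
    rw [List.range_succ]
  have hprevne1 : row.getD (row.length - 2) 0 ≠ 1 := by omega
  have hlastA : pvVal row (row.length - 1) = 0 := by
    rw [pvVal, if_neg (not_not_intro hlast), if_pos rfl, if_pos (by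
      simp only [List.mem_cons, List.not_mem_nil, or_false]
      omega)]
  have hlastB : pvValB row (row.length - 1) = 1 := by
    rw [pvValB, if_neg (not_not_intro hlast), if_neg (by
      intro hc
      rw [show row.length - 1 - 1 = row.length - 2 from by omega] at hc
      exact hprevne1 hc.2)]
    rw [List.drop_eq_nil_of_le (by omega)]
    simp [pvCountOnes]
  have hpref : (List.range (row.length - 1)).map (pvVal row)
      = (List.range (row.length - 1)).map (pvValB row) :=
    List.map_congr_left (fun i hi => vals_agree row i (by simpa using hi))
  rw [pvSpec, pvSpecB, hsplit, List.map_append, List.map_append, List.filter_append,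
    List.filter_append, hpref]
  simp only [List.map_cons, List.map_nil, List.filter_cons, List.filter_nil, hlastA, hlastB]
  intro heq
  have hlen := congrArg List.length heq
  simp at hlen
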